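-- pv_equiv track=rewrite | github.com/Simon-Kotchou/DriveDiT | models/vae3d.py | _compute_strides
-- ===== SOURCE A (Python) =====
-- from typing import Tuple, Optional, List, Dict, Any, Union
--
-- def _compute_strides(total_compression: int, num_levels: int) -> List[int]:
--     """Compute per-level strides to achieve total compression."""
--     strides = []
--     remaining = total_compression
--
--     for i in range(num_levels):
--         if remaining >= 2:
--             stride = 2
--             remaining //= 2
--         else:
--             stride = 1
--         strides.append(stride)
--
--     return strides
-- ===== SOURCE B (Python) =====
-- def _compute_strides(total_compression: int, num_levels: int):
--     """Closed form: number of 2-strides = floor(log2(total_compression)), clamped to the level count."""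
--     levels = max(num_levels, 0)
--     count = total_compression.bit_length() - 1 if total_compression >= 1 else 0
--     count = min(count, levels)
--     return [2] * count + [1] * (levels - count)
-- ===== Notes on version B (the rewrite author's own statement) =====
-- stated objective: simpler
-- what changed: Replaces the iterative halving loop with a closed-form bit_length count of 2-strides plus list replication/concatenation.
import Mathlib
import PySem

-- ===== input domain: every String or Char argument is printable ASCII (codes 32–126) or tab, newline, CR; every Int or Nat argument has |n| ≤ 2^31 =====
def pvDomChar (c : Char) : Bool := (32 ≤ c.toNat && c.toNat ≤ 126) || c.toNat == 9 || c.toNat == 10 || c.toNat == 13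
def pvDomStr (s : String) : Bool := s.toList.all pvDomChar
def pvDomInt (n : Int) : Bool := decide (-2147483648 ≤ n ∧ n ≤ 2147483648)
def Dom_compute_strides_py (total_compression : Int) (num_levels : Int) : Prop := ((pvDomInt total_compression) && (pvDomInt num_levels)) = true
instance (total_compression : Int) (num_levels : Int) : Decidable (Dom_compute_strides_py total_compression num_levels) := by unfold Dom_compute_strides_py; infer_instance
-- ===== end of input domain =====

-- B replaces A's iterative halving loop by a closed-form count of 2-strides (bit_length) plus list replication; objective: simpler.

-- ===== PORT A =====
-- the for-loop over range(num_levels) with state `remaining`; each iteration appends 2 (halving) or 1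
def csLoopA : Nat → Int → List Int
  | 0, _ => []
  | n + 1, remaining =>
    if remaining ≥ 2 then 2 :: csLoopA n (PySem.Int.floordiv remaining 2)
    else 1 :: csLoopA n remaining

def compute_strides_py (total_compression : Int) (num_levels : Int) : List Int :=
  csLoopA num_levels.toNat total_compression

-- ===== PORT B =====
def compute_strides_py_alt (total_compression : Int) (num_levels : Int) : List Int :=
  let levels : Nat := (max num_levels 0).toNat
  let count : Nat := min (if total_compression ≥ 1 then PySem.Int.bitLength total_compression - 1 else 0) levels
  List.replicate count 2 ++ List.replicate (levels - count) 1

-- ===== PRECONDITION & SPEC =====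
def Spec_compute_strides_py (total_compression : Int) (num_levels : Int) (out : List Int) : Prop := out = compute_strides_py_alt total_compression num_levels
instance (total_compression : Int) (num_levels : Int) (out : List Int) : Decidable (Spec_compute_strides_py total_compression num_levels out) := by unfold Spec_compute_strides_py; infer_instance

-- ===== CLAIM (what is proved, stated in full; the proofs are below) =====
def Claim_equal_compute_strides_py : Prop := ∀ (total_compression : Int) (num_levels : Int), Dom_compute_strides_py total_compression num_levels → Spec_compute_strides_py total_compression num_levels (compute_strides_py total_compression num_levels)

-- ===== LEMMAS AND PROOFS =====

-- the count of 2-strides the loop will emit from state `rem`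
def cntA (rem : Int) : Nat := if rem ≥ 1 then PySem.Int.bitLength rem - 1 else 0

theorem cntA_lt_two (rem : Int) (h : rem < 2) : cntA rem = 0 := by
  unfold cntA
  split
  · have : rem = 1 := by omega
    subst this; decide
  · rfl

theorem cntA_ge_two (rem : Int) (h : rem ≥ 2) :
    cntA rem = cntA (PySem.Int.floordiv rem 2) + 1 := by
  have hfd : PySem.Int.floordiv rem 2 = rem / 2 :=
    PySem.Int.floordiv_eq_ediv_of_pos (by omega)
  have hfd1 : PySem.Int.floordiv rem 2 ≥ 1 := by rw [hfd]; omega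
  have hbl : PySem.Int.bitLength rem = PySem.Int.bitLength (PySem.Int.floordiv rem 2) + 1 :=
    PySem.Int.bitLength_of_pos (by omega)
  have hbl1 : PySem.Int.bitLength (PySem.Int.floordiv rem 2) ≥ 1 := by
    rw [PySem.Int.bitLength_of_pos (by omega : (0:Int) < PySem.Int.floordiv rem 2)]
    omega
  unfold cntA
  rw [if_pos (by omega), if_pos hfd1, hbl]
  omega

theorem csLoopA_closed (n : Nat) (rem : Int) :
    csLoopA n rem = List.replicate (min (cntA rem) n) 2 ++ List.replicate (n - min (cntA rem) n) 1 := by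
  induction n generalizing rem with
  | zero => simp [csLoopA]
  | succ n ih =>
    unfold csLoopA
    by_cases h : rem ≥ 2
    · rw [if_pos h, ih, cntA_ge_two rem h]
      have hmin : min (cntA (PySem.Int.floordiv rem 2) + 1) (n + 1)
          = min (cntA (PySem.Int.floordiv rem 2)) n + 1 := by omega
      have hsub : n + 1 - (min (cntA (PySem.Int.floordiv rem 2)) n + 1)
          = n - min (cntA (PySem.Int.floordiv rem 2)) n := by omega
      rw [hmin, hsub, List.replicate_succ]
      simp only [List.cons_append]
    · rw [if_neg h, ih, cntA_lt_two rem (by omega)]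
      simp [List.replicate_succ]

theorem compute_strides_py_spec' (tc nl : Int) :
    compute_strides_py tc nl = compute_strides_py_alt tc nl := by
  unfold compute_strides_py compute_strides_py_alt
  have hlev : (max nl 0).toNat = nl.toNat := by omega
  rw [hlev, csLoopA_closed]
  show _ = List.replicate (min (cntA tc) nl.toNat) 2 ++ _
  rfl

-- ===== VERDICT (by name: the statement is the Claim_ definition above) =====
theorem compute_strides_py_spec : Claim_equal_compute_strides_py := by
  intro tc nl _
  exact compute_strides_py_spec' tc nl
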